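-- pv_equiv track=rewrite | github.com/DaniFdezAlvarez/shexer | shexer/io/graph/yielder/big_ttl_triples_yielder.py | _count_prior_backslashes
-- ===== SOURCE A (Python) =====
-- def _count_prior_backslashes(an_str, quote_pos):
--     """
--     We assume that there is at least a backslash at an_str[pos-1], so pos-1 is a non-negative index of an_str
--     """
--     counter = 1
--     quote_pos -= 2
--     while quote_pos >= 0:
--         if an_str[quote_pos] == "\\":
--             counter += 1
--         else:
--             return counter
--         quote_pos -= 1
--     return counter
-- ===== SOURCE B (Python) =====
-- def _count_prior_backslashes(an_str, quote_pos):
--     if quote_pos < 2: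
--         return 1
--     prefix = an_str[:quote_pos - 1]
--     return 1 + (len(prefix) - len(prefix.rstrip("\\")))
-- ===== Notes on version B (the rewrite author's own statement) =====
-- stated objective: idiomatic
-- what changed: Replaces the explicit backward character-by-character while-loop with slicing off the prefix an_str[:quote_pos-1] and measuring its trailing backslash run via rstrip('\\'), guarded by an early return 1 when quote_pos < 2.
import Mathlib
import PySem

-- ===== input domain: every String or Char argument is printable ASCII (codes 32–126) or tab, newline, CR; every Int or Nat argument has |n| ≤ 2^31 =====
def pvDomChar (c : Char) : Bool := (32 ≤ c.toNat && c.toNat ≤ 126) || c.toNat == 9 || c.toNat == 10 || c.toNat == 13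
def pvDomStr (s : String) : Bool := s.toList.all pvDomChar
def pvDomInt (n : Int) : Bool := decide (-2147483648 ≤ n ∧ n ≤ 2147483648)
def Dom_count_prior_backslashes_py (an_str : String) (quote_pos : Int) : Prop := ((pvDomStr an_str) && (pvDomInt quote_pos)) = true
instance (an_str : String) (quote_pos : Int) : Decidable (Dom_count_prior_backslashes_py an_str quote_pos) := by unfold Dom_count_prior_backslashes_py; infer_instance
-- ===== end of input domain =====

-- B replaces A's backward character loop with a slice + rstrip('\') trailing-run measurement (idiomatic; return value only).

-- ===== PORT A =====
-- the while-loop of A: scan backward from index q, incrementing counter while backslashes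
def pvCountLoop (chars : List Char) (q : Int) (counter : Int) : Int :=
  if 0 ≤ q then
    match PySem.List.pyGet? chars q with
    | none => counter  -- IndexError in Python; excluded by Pre_
    | some c => if c = '\\' then pvCountLoop chars (q - 1) (counter + 1) else counter
  else counter
termination_by (q + 1).toNat
decreasing_by omega

def count_prior_backslashes_py (an_str : String) (quote_pos : Int) : Int :=
  pvCountLoop an_str.toList (quote_pos - 2) 1

-- ===== PORT B =====
def count_prior_backslashes_py_alt (an_str : String) (quote_pos : Int) : Int :=
  if quote_pos < 2 then 1
  else
    let pre := PySem.List.slice an_str.toList none (some (quote_pos - 1))  -- an_str[:quote_pos-1]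
    -- prefix.rstrip("\\") ported by hand: drop the trailing run of backslashes (exact)
    let stripped := (pre.reverse.dropWhile (· == '\\')).reverse
    1 + ((pre.length : Int) - (stripped.length : Int))

-- ===== PRECONDITION & SPEC =====
-- A raises IndexError when its first probed index quote_pos-2 is past the end of the string.
def Pre_count_prior_backslashes_py (an_str : String) (quote_pos : Int) : Prop :=
  quote_pos ≤ (an_str.toList.length : Int) + 1
instance (an_str : String) (quote_pos : Int) : Decidable (Pre_count_prior_backslashes_py an_str quote_pos) := by unfold Pre_count_prior_backslashes_py; infer_instance

def pvWitness_count_prior_backslashes_py : String × Int := ("ab", 2)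


def Spec_count_prior_backslashes_py (an_str : String) (quote_pos : Int) (out : Int) : Prop := out = count_prior_backslashes_py_alt an_str quote_pos
instance (an_str : String) (quote_pos : Int) (out : Int) : Decidable (Spec_count_prior_backslashes_py an_str quote_pos out) := by unfold Spec_count_prior_backslashes_py; infer_instance

-- ===== CLAIM (what is proved, stated in full; the proofs are below) =====
def Claim_equal_count_prior_backslashes_py : Prop := ∀ (an_str : String) (quote_pos : Int), Dom_count_prior_backslashes_py an_str quote_pos → Pre_count_prior_backslashes_py an_str quote_pos → Spec_count_prior_backslashes_py an_str quote_pos (count_prior_backslashes_py an_str quote_pos)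


-- ===== LEMMAS AND PROOFS =====

-- A's loop started at a valid index k counts the trailing backslash run of the first k+1 characters.
theorem pvCountLoop_eq (chars : List Char) (k : Nat) (hk : k < chars.length) :
    ∀ counter : Int, pvCountLoop chars (k : Int) counter
      = counter + (((chars.take (k + 1)).reverse.takeWhile (· == '\\')).length : Int) := by
  induction k with
  | zero =>
    intro counter
    unfold pvCountLoop
    rw [if_pos (by omega)]
    rw [PySem.List.pyGet?_of_nonneg _ (by omega)]
    simp only [Nat.cast_zero, Int.toNat_zero]
    rw [List.getElem?_eq_getElem (by omega)]
    show (if chars[0] = '\\' then pvCountLoop chars (((0 : Nat) : Int) - 1) (counter + 1)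
          else counter) = _
    have h1 : chars.take 1 = [chars[0]] := by
      cases chars with
      | nil => simp at hk
      | cons a l => simp
    by_cases hb : chars[0] = '\\'
    · rw [if_pos hb]
      unfold pvCountLoop
      rw [if_neg (by omega)]
      simp [h1, hb]
    · rw [if_neg hb]
      simp [h1, hb]
  | succ k ih =>
    intro counter
    unfold pvCountLoop
    rw [if_pos (by positivity)]
    rw [PySem.List.pyGet?_of_nonneg _ (by positivity)]
    have ht : ((k + 1 : Nat) : Int).toNat = k + 1 := by omega
    rw [ht, List.getElem?_eq_getElem hk]
    show (if chars[k + 1] = '\\' then pvCountLoop chars (((k + 1 : Nat) : Int) - 1) (counter + 1)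
          else counter) = _
    have hrev : (chars.take (k + 1 + 1)).reverse
        = chars[k + 1] :: (chars.take (k + 1)).reverse := by
      rw [List.take_add_one, List.getElem?_eq_getElem hk]
      simp
    by_cases hb : chars[k + 1] = '\\'
    · rw [if_pos hb]
      have hcast : ((k + 1 : Nat) : Int) - 1 = (k : Int) := by omega
      rw [hcast, ih (by omega) (counter + 1), hrev]
      simp [hb, List.takeWhile]
      omega
    · rw [if_neg hb]
      rw [hrev]
      simp [List.takeWhile, beq_eq_false_iff_ne.mpr hb]

theorem pvCountLoop_neg (chars : List Char) (q counter : Int) (hq : q < 0) :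
    pvCountLoop chars q counter = counter := by
  unfold pvCountLoop
  rw [if_neg (by omega)]

-- ===== VERDICT (by name: the statement is the Claim_ definition above) =====
theorem count_prior_backslashes_py_spec : Claim_equal_count_prior_backslashes_py := by
  intro an_str quote_pos _hdom hpre
  unfold Spec_count_prior_backslashes_py count_prior_backslashes_py count_prior_backslashes_py_alt
  unfold Pre_count_prior_backslashes_py at hpre
  set chars := an_str.toList with hchars
  by_cases hlt : quote_pos < 2
  · rw [if_pos hlt, pvCountLoop_neg _ _ _ (by omega)]
  · rw [if_neg hlt]
    -- the prefix an_str[:quote_pos-1]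
    have hslice : PySem.List.slice chars none (some (quote_pos - 1))
        = chars.take (quote_pos - 1).toNat := PySem.List.slice_to _ (by omega)
    set p : Nat := (quote_pos - 1).toNat with hp
    have hp1 : 1 ≤ p := by omega
    have hple : p ≤ chars.length := by omega
    have hq2 : quote_pos - 2 = ((p - 1 : Nat) : Int) := by omega
    rw [hq2, pvCountLoop_eq chars (p - 1) (by omega)]
    have hps : p - 1 + 1 = p := by omega
    rw [hps]
    simp only [hslice]
    set pre := chars.take p with hpref
    have hlenp : pre.length = p := by
      simp [hpref, hple]
    have hsplit : (pre.reverse.takeWhile (· == '\\')).length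
        + (pre.reverse.dropWhile (· == '\\')).length = p := by
      have := congrArg List.length (List.takeWhile_append_dropWhile (p := (· == '\\')) (l := pre.reverse))
      simp only [List.length_append, List.length_reverse] at this
      omega
    simp only [List.length_reverse, hlenp]
    omega
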